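-- pv_equiv track=rewrite | github.com/meridaka/rosalind | rosalind_lcsm.py | motif_validator
-- ===== SOURCE A (Python) =====
-- def motif_validator(sequence_list, motif_list):
--     validated_motifs = []
--     for motif in motif_list:
--         counter = 0
--         for sequence in sequence_list:
--             if motif in sequence:
--                 counter += 1
--             else:
--                 break
--         if counter == len(sequence_list):
--             validated_motifs.append(motif)
--     return validated_motifs
-- ===== SOURCE B (Python) =====
-- def motif_validator(sequence_list, motif_list):
--     # sequence-outer narrowing: each sequence filters the surviving candidates
--     surviving = list(motif_list)
--     for sequence in sequence_list:
--         surviving = [motif for motif in surviving if motif in sequence]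
--     return surviving
-- ===== Notes on version B (the rewrite author's own statement) =====
-- stated objective: alternative
-- what changed: B inverts the loop nesting: instead of counting, per motif, how many leading sequences contain it, B folds over the sequences once, each sequence filtering the surviving candidate motifs.
import Mathlib
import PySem

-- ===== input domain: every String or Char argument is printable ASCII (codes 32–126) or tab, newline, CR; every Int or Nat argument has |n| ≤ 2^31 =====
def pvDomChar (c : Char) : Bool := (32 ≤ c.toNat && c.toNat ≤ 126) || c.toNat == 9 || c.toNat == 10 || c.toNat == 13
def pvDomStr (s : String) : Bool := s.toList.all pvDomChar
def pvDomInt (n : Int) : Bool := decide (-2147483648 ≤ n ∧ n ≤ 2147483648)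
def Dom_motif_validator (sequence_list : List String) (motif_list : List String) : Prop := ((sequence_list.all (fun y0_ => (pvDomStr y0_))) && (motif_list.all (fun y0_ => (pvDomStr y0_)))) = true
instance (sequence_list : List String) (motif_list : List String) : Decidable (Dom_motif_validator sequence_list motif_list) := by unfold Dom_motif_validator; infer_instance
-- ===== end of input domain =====

-- B replaces A's motif-outer counting loop by a sequence-outer narrowing fold (alternative decomposition, same cost).


-- ===== PORT A =====
-- inner loop of A: counter over sequences, break at the first sequence not containing motif
def pvCounter (motif : String) : List String → Nat
  | [] => 0
  | s :: rest => if PySem.Str.isIn motif s then pvCounter motif rest + 1 else 0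

def motif_validator (sequence_list : List String) (motif_list : List String) : List String :=
  motif_list.foldl
    (fun validated_motifs motif =>
      if pvCounter motif sequence_list = sequence_list.length
      then validated_motifs ++ [motif] else validated_motifs)
    []

-- ===== PORT B =====
def motif_validator_alt (sequence_list : List String) (motif_list : List String) : List String :=
  sequence_list.foldl
    (fun surviving sequence => surviving.filter (fun motif => PySem.Str.isIn motif sequence))
    motif_list

-- ===== PRECONDITION & SPEC =====
def Spec_motif_validator (sequence_list : List String) (motif_list : List String) (out : List String) : Prop := out = motif_validator_alt sequence_list motif_list
instance (sequence_list : List String) (motif_list : List String) (out : List String) : Decidable (Spec_motif_validator sequence_list motif_list out) := by unfold Spec_motif_validator; infer_instance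

-- ===== CLAIM (what is proved, stated in full; the proofs are below) =====
def Claim_equal_motif_validator : Prop := ∀ (sequence_list : List String) (motif_list : List String), Dom_motif_validator sequence_list motif_list → Spec_motif_validator sequence_list motif_list (motif_validator sequence_list motif_list)

-- ===== LEMMAS AND PROOFS =====

theorem pvCounter_le (motif : String) (seqs : List String) :
    pvCounter motif seqs ≤ seqs.length := by
  induction seqs with
  | nil => simp [pvCounter]
  | cons s rest ih =>
    simp only [pvCounter, PySem.Str.isIn, List.length_cons]
    split <;> omega

-- A's counter reaches the full length iff every sequence contains the motif
theorem pvCounter_eq_length_iff (motif : String) (seqs : List String) :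
    (pvCounter motif seqs = seqs.length) ↔ seqs.all (fun s => PySem.Str.isIn motif s) = true := by
  induction seqs with
  | nil => simp [pvCounter]
  | cons s rest ih =>
    simp only [pvCounter, PySem.Str.isIn, List.all_cons, List.length_cons] at *
    by_cases h : PySem.Chars.isIn motif.toList s.toList = true
    · simp [h, ih]
    · have hle := pvCounter_le motif rest
      simp only [Bool.not_eq_true] at h
      simp [h]

-- B's narrowing fold is the filter by "contained in all sequences"
theorem alt_eq_filter (seqs motifs : List String) :
    motif_validator_alt seqs motifs
      = motifs.filter (fun m => seqs.all (fun s => PySem.Str.isIn m s)) := by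
  induction seqs generalizing motifs with
  | nil => simp [motif_validator_alt]
  | cons s rest ih =>
    simp only [motif_validator_alt, List.foldl_cons] at *
    rw [ih, List.filter_filter]
    apply List.filter_congr
    intro m _
    exact Bool.and_comm _ _

theorem motif_validator_spec_aux (seqs motifs : List String) :
    motif_validator seqs motifs = motif_validator_alt seqs motifs := by
  unfold motif_validator
  rw [PySem.List.foldl_append_ite_eq_filter, alt_eq_filter]
  simp only [List.nil_append]
  apply List.filter_congr
  intro m _
  rw [Bool.eq_iff_iff, decide_eq_true_iff, pvCounter_eq_length_iff]

-- ===== VERDICT (by name: the statement is the Claim_ definition above) =====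
theorem motif_validator_spec : Claim_equal_motif_validator := by
  intro seqs motifs _
  exact motif_validator_spec_aux seqs motifs
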